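-- pv_equiv track=rewrite | github.com/OakLake/Typeshift_App_Solver | Typeshift.py | makeWords
-- ===== SOURCE A (Python) =====
-- def makeWords(lettersSet):
--
--     if len(lettersSet) == 1:
--         return lettersSet[0]
--
--     comb = []
--     for c in lettersSet[0]:
--         for d in lettersSet[1]:
--             comb.append(c+d)
--
--     lettersSet[0:2] = [comb]
--
--     return makeWords(lettersSet)
-- ===== SOURCE B (Python) =====
-- def makeWords(lettersSet):
--     acc = lettersSet[0]
--     for s in lettersSet[1:]:
--         acc = [a + b for a in acc for b in s]
--     return acc
-- ===== Notes on version B (the rewrite author's own statement) =====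
-- stated objective: idiomatic
-- what changed: Replaces A's recursion-with-list-mutation (repeatedly collapsing the first two sets in place and recursing) by a single iterative fold over the tail with a comprehension, leaving the input list unmutated (return value identical).
-- outside the precondition, e.g. on makeWords([]): A raises IndexError, B raises IndexError
import Mathlib
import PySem

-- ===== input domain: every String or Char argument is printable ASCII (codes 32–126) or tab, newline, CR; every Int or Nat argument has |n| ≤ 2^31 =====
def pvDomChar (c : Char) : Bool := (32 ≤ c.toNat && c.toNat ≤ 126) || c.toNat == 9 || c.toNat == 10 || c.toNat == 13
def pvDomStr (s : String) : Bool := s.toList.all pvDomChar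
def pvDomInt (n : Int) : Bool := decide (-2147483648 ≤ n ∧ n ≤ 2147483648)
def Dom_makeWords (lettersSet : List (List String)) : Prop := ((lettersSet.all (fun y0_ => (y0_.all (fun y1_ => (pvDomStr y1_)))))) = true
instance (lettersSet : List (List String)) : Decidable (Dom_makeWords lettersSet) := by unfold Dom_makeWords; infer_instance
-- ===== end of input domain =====

-- B replaces A's recursion-with-in-place-collapse by an iterative fold with a comprehension (idiomatic);
-- A mutates its argument list (collapsing it to one element when len >= 2), B does not — the equivalence
-- proved here is about the RETURN value only.


-- ===== PORT A =====
-- comb = []; for c in lettersSet[0]: for d in lettersSet[1]: comb.append(c+d)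
def pvCombA (x y : List String) : List String :=
  x.foldl (fun comb c => y.foldl (fun comb2 d => comb2 ++ [c ++ d]) comb) []

def makeWords (lettersSet : List (List String)) : List String :=
  match lettersSet with
  | [] => []                       -- Python raises IndexError here; excluded by Pre_makeWords
  | [x] => x                       -- len(lettersSet) == 1
  | x :: y :: rest => makeWords (pvCombA x y :: rest)   -- lettersSet[0:2] = [comb]; recurse
termination_by lettersSet.length

-- ===== PORT B =====
def makeWords_alt (lettersSet : List (List String)) : List String :=
  match lettersSet with
  | [] => []                       -- Python raises IndexError here; excluded by Pre_makeWords
  | x :: rest =>                   -- acc = lettersSet[0]; for s in lettersSet[1:]: acc = [a+b for a in acc for b in s]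
      rest.foldl (fun acc s => acc.flatMap (fun a => s.map (fun b => a ++ b))) x

-- ===== PRECONDITION & SPEC =====
-- Pre_ excludes only the empty list, on which both Pythons raise IndexError.
def Pre_makeWords (lettersSet : List (List String)) : Prop := lettersSet ≠ []
instance (lettersSet : List (List String)) : Decidable (Pre_makeWords lettersSet) := by unfold Pre_makeWords; infer_instance
def pvWitness_makeWords : List (List String) := [["a", "b"], ["c", "d"]]

def Spec_makeWords (lettersSet : List (List String)) (out : List String) : Prop := out = makeWords_alt lettersSet
instance (lettersSet : List (List String)) (out : List String) : Decidable (Spec_makeWords lettersSet out) := by unfold Spec_makeWords; infer_instance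

-- ===== CLAIM (what is proved, stated in full; the proofs are below) =====
def Claim_equal_makeWords : Prop := ∀ (lettersSet : List (List String)), Dom_makeWords lettersSet → Pre_makeWords lettersSet → Spec_makeWords lettersSet (makeWords lettersSet)

-- ===== LEMMAS AND PROOFS =====
theorem pvInner (y : List String) (c : String) (acc : List String) :
    y.foldl (fun a d => a ++ [c ++ d]) acc = acc ++ y.map (fun b => c ++ b) := by
  induction y generalizing acc with
  | nil => simp
  | cons d t ih => simp [List.foldl, ih]

theorem pvCombA_eq (x y : List String) :
    pvCombA x y = x.flatMap (fun a => y.map (fun b => a ++ b)) := by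
  unfold pvCombA
  suffices h : ∀ acc : List String,
      x.foldl (fun comb c => y.foldl (fun comb2 d => comb2 ++ [c ++ d]) comb) acc
        = acc ++ x.flatMap (fun a => y.map (fun b => a ++ b)) by
    simpa using h []
  induction x with
  | nil => intro acc; simp
  | cons c t ih => intro acc; rw [List.foldl_cons, pvInner, ih, List.flatMap_cons, List.append_assoc]

theorem pvMain (rest : List (List String)) (x : List String) :
    makeWords (x :: rest)
      = rest.foldl (fun acc s => acc.flatMap (fun a => s.map (fun b => a ++ b))) x := by
  induction rest generalizing x with
  | nil => simp [makeWords]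
  | cons y t ih =>
      rw [makeWords]
      simp [List.foldl, ih, pvCombA_eq]

-- ===== VERDICT (by name: the statement is the Claim_ definition above) =====
theorem makeWords_spec : Claim_equal_makeWords := by
  intro l _ hpre
  cases l with
  | nil => exact absurd rfl hpre
  | cons x rest => exact pvMain rest x
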